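-- pv_equiv track=rewrite | github.com/ijbd/fern | src/sketches/2022-03-18-mish-raster.py | reduce_segments
-- ===== SOURCE A (Python) =====
-- def reduce_segments(segments: list) -> list:
--
-- 	new_segments = list()
--
-- 	for seg in segments:
-- 		new_seg = list()
-- 		new_seg.append(seg[0])
--
-- 		for i in range(1,len(seg)-1):
-- 			cond1 = seg[i][0] - seg[i-1][0] != seg[i+1][0] - seg[i][0]
-- 			cond2 = seg[i][1] - seg[i-1][1] != seg[i+1][1] - seg[i][1]
-- 			if cond1 or cond2:
-- 				new_seg.append(seg[i])
-- 		new_seg.append(seg[-1])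
--
-- 		if len(new_seg) > 1:
-- 			new_segments.append(new_seg)
--
-- 	return new_segments
-- ===== SOURCE B (Python) =====
-- def reduce_segments(segments: list) -> list:
-- 	new_segments = []
-- 	for seg in segments:
-- 		# step vectors between consecutive points
-- 		diffs = [(q[0] - p[0], q[1] - p[1]) for p, q in zip(seg, seg[1:])]
-- 		# run-length encode the step vectors
-- 		runs = []
-- 		for d in diffs:
-- 			if runs and runs[-1][0] == d:
-- 				runs[-1][1] += 1
-- 			else:
-- 				runs.append([d, 1])
-- 		# a point survives exactly at the boundary between two runs
-- 		new_seg = [seg[0]]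
-- 		pos = 0
-- 		for d, c in runs[:-1]:
-- 			pos += c
-- 			new_seg.append(seg[pos])
-- 		new_seg.append(seg[-1])
-- 		if len(new_seg) > 1:
-- 			new_segments.append(new_seg)
-- 	return new_segments
-- ===== Notes on version B (the rewrite author's own statement) =====
-- stated objective: alternative
-- what changed: B run-length-encodes each segment's list of step vectors and then decodes the run boundaries (cumulative run ends) to pick the surviving points, instead of A's single accumulator loop testing both neighbouring deltas at every interior index.
import Mathlib
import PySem

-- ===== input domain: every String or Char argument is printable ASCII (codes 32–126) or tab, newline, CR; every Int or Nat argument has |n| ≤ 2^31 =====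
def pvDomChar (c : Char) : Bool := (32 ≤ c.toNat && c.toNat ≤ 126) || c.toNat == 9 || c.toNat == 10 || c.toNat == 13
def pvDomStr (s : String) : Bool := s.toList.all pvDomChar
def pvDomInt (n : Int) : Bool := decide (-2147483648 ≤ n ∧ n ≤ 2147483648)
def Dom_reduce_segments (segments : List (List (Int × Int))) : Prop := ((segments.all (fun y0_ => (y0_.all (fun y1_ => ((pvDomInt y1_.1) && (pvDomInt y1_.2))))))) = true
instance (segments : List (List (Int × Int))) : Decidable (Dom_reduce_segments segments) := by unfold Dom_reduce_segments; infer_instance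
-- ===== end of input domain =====

-- B run-length-encodes each segment's step vectors and then decodes run boundaries; alternative algorithm, same cost.


-- ===== PORT A =====
-- A's inner loop over one segment: append seg[0]; for i in range(1,len(seg)-1)
-- append seg[i] iff a neighbouring delta differs componentwise; append seg[-1].
def reduceSegA (seg : List (Int × Int)) : List (Int × Int) :=
  let newSeg : List (Int × Int) := [PySem.List.pyGetD seg 0 (0, 0)]
  let newSeg :=
    (PySem.List.pyRange 1 ((seg.length : Int) - 1) 1).foldl
      (fun acc i =>
        let pm := PySem.List.pyGetD seg (i - 1) (0, 0)
        let p := PySem.List.pyGetD seg i (0, 0)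
        let pp := PySem.List.pyGetD seg (i + 1) (0, 0)
        let cond1 : Bool := p.1 - pm.1 != pp.1 - p.1
        let cond2 : Bool := p.2 - pm.2 != pp.2 - p.2
        if cond1 || cond2 then acc ++ [p] else acc)
      newSeg
  newSeg ++ [PySem.List.pyGetD seg (-1) (0, 0)]

def reduce_segments (segments : List (List (Int × Int))) : List (List (Int × Int)) :=
  segments.foldl
    (fun newSegments seg =>
      let newSeg := reduceSegA seg
      if newSeg.length > 1 then newSegments ++ [newSeg] else newSegments)
    []

-- ===== PORT B =====
-- B: run-length-encode the step vectors, then decode the run boundaries.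
-- 'if runs and runs[-1][0] == d: runs[-1][1] += 1 else: runs.append([d, 1])'
def rleStep (rs : List ((Int × Int) × Int)) (d : Int × Int) : List ((Int × Int) × Int) :=
  match rs.getLast? with
  | some dc => if dc.1 == d then rs.dropLast ++ [(dc.1, dc.2 + 1)] else rs ++ [(d, 1)]
  | none => rs ++ [(d, 1)]

def reduceSegB (seg : List (Int × Int)) : List (Int × Int) :=
  let diffs : List (Int × Int) :=
    (seg.zip (seg.drop 1)).map (fun pq => (pq.2.1 - pq.1.1, pq.2.2 - pq.1.2))
  let runs : List ((Int × Int) × Int) := diffs.foldl rleStep []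
  -- 'pos = 0; for d, c in runs[:-1]: pos += c; new_seg.append(seg[pos])'
  let st : Int × List (Int × Int) :=
    runs.dropLast.foldl
      (fun st dc => (st.1 + dc.2, st.2 ++ [PySem.List.pyGetD seg (st.1 + dc.2) (0, 0)]))
      ((0 : Int), [PySem.List.pyGetD seg 0 (0, 0)])
  st.2 ++ [PySem.List.pyGetD seg (-1) (0, 0)]

def reduce_segments_alt (segments : List (List (Int × Int))) : List (List (Int × Int)) :=
  segments.foldl
    (fun newSegments seg =>
      let newSeg := reduceSegB seg
      if newSeg.length > 1 then newSegments ++ [newSeg] else newSegments)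
    []

-- ===== PRECONDITION & SPEC =====
-- Pre_ excludes inputs containing an empty segment: there Python A raises IndexError at seg[0] (and B raises too).
def Pre_reduce_segments (segments : List (List (Int × Int))) : Prop :=
  ∀ seg ∈ segments, seg ≠ []
instance (segments : List (List (Int × Int))) : Decidable (Pre_reduce_segments segments) := by
  unfold Pre_reduce_segments; infer_instance

def pvWitness_reduce_segments : (List (List (Int × Int))) :=
  [[(0, 0), (1, 1), (2, 2), (3, 4)], [(5, 5)]]

def Spec_reduce_segments (segments : List (List (Int × Int))) (out : List (List (Int × Int))) : Prop := out = reduce_segments_alt segments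
instance (segments : List (List (Int × Int))) (out : List (List (Int × Int))) : Decidable (Spec_reduce_segments segments out) := by unfold Spec_reduce_segments; infer_instance

-- ===== CLAIM (what is proved, stated in full; the proofs are below) =====
def Claim_equal_reduce_segments : Prop := ∀ (segments : List (List (Int × Int))), Dom_reduce_segments segments → Pre_reduce_segments segments → Spec_reduce_segments segments (reduce_segments segments)

-- ===== LEMMAS AND PROOFS =====

-- total count of a run list
def sumC (rs : List ((Int × Int) × Int)) : Int := (rs.map Prod.snd).sum

-- the cumulative end position of each run, starting from pos0
def cumEnds (pos0 : Int) : List ((Int × Int) × Int) → List Int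
  | [] => []
  | dc :: rest => (pos0 + dc.2) :: cumEnds (pos0 + dc.2) rest

theorem sumC_append (xs ys : List ((Int × Int) × Int)) :
    sumC (xs ++ ys) = sumC xs + sumC ys := by
  simp [sumC]

theorem sumC_cons (dc : (Int × Int) × Int) (rs : List ((Int × Int) × Int)) :
    sumC (dc :: rs) = dc.2 + sumC rs := by
  simp [sumC]

theorem cumEnds_append (p : Int) (xs ys : List ((Int × Int) × Int)) :
    cumEnds p (xs ++ ys) = cumEnds p xs ++ cumEnds (p + sumC xs) ys := by
  induction xs generalizing p with
  | nil => simp [cumEnds, sumC]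
  | cons dc rest ih =>
    simp only [List.cons_append, cumEnds, ih, sumC_cons, add_assoc]

theorem decode_fold (seg : List (Int × Int)) (rs : List ((Int × Int) × Int))
    (pos0 : Int) (acc : List (Int × Int)) :
    rs.foldl (fun st dc => (st.1 + dc.2, st.2 ++ [PySem.List.pyGetD seg (st.1 + dc.2) (0, 0)])) (pos0, acc)
      = (pos0 + sumC rs, acc ++ (cumEnds pos0 rs).map (fun i => PySem.List.pyGetD seg i (0, 0))) := by
  induction rs generalizing pos0 acc with
  | nil => simp [sumC, cumEnds]
  | cons dc rest ih =>
    simp only [List.foldl_cons, ih, cumEnds, sumC_cons, List.map_cons]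
    rw [Prod.mk.injEq]
    constructor
    · ring
    · simp

-- pair inequality as Bool equals componentwise-or of inequalities
theorem pair_bne (p q : Int × Int) :
    (p != q) = ((p.1 != q.1) || (p.2 != q.2)) := by
  rcases p with ⟨a, b⟩; rcases q with ⟨c, d⟩
  simp only [bne]
  rw [Bool.eq_iff_iff]
  simp [Prod.ext_iff]
  tauto

-- pyGetD on an appended list, left part
theorem pyGetD_append_lt (xs ys : List (Int × Int)) (i : Int) (d : Int × Int)
    (h0 : 0 ≤ i) (h : i < (xs.length : Int)) :
    PySem.List.pyGetD (xs ++ ys) i d = PySem.List.pyGetD xs i d := by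
  rw [PySem.List.pyGetD_eq_getElem _ _ h0 (by simp; omega),
      PySem.List.pyGetD_eq_getElem _ _ h0 h]
  exact List.getElem_append_left (by omega)

theorem pyGetD_concat_len (xs : List (Int × Int)) (y : Int × Int) (d : Int × Int) :
    PySem.List.pyGetD (xs ++ [y]) (xs.length : Int) d = y := by
  rw [PySem.List.pyGetD_eq_getElem _ _ (by omega) (by simp)]
  simp

theorem pyGetD_getLast (xs : List (Int × Int)) (x : Int × Int) (d : Int × Int)
    (h : xs.getLast? = some x) :
    PySem.List.pyGetD xs ((xs.length : Int) - 1) d = x := by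
  have hne : xs ≠ [] := by intro he; simp [he] at h
  have hlen : 1 ≤ xs.length := List.length_pos_of_ne_nil hne
  rw [PySem.List.pyGetD_eq_getElem _ _ (by omega) (by omega)]
  have ht : ((xs.length : Int) - 1).toNat = xs.length - 1 := by omega
  rw [List.getLast?_eq_getElem?, List.getElem?_eq_getElem (by omega)] at h
  simp only [ht]
  exact (Option.some.injEq _ _).mp h

-- main RLE characterisation: total count, last run's diff, and the decoded
-- run boundaries = the interior indices where adjacent diffs differ
theorem rle_spec (ds : List (Int × Int)) :
    sumC (ds.foldl rleStep []) = (ds.length : Int)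
    ∧ ((ds.foldl rleStep []).getLast?).map Prod.fst = ds.getLast?
    ∧ cumEnds 0 (ds.foldl rleStep []).dropLast
      = (PySem.List.pyRange 1 (ds.length : Int) 1).filter
          (fun i => PySem.List.pyGetD ds (i - 1) (0, 0) != PySem.List.pyGetD ds i (0, 0)) := by
  induction ds using List.reverseRecOn with
  | nil =>
    refine ⟨by simp [sumC], by simp, ?_⟩
    simp only [List.length_nil, Nat.cast_zero]
    rw [PySem.List.pyRange_one_eq_nil (by omega)]
    simp [cumEnds]
  | append_singleton ds d ih =>
    obtain ⟨hsum, hlast, hends⟩ := ih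
    rw [List.foldl_append]
    simp only [List.foldl_cons, List.foldl_nil]
    set rs := ds.foldl rleStep [] with hrsdef
    cases hgl : rs.getLast? with
    | none =>
      have hrs : rs = [] := List.getLast?_eq_none_iff.mp hgl
      have hds : ds = [] := by
        rw [hrs] at hlast; simp at hlast
        exact List.getLast?_eq_none_iff.mp hlast.symm
      subst hds
      have hstep : rleStep rs d = [(d, 1)] := by rw [hrs]; rfl
      rw [hstep]
      refine ⟨by simp [sumC], by simp, ?_⟩
      rw [show (([] ++ [d] : List (Int × Int)).length : Int) = 1 by simp,
          PySem.List.pyRange_one_eq_nil (by omega)]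
      simp [cumEnds]
    | some dc =>
      have hne : rs ≠ [] := by intro he; rw [he] at hgl; simp at hgl
      have hdsl : ds.getLast? = some dc.1 := by
        rw [hgl] at hlast; simpa using hlast.symm
      have hdsne : ds ≠ [] := by intro he; simp [he] at hdsl
      have hm : 1 ≤ ds.length := List.length_pos_of_ne_nil hdsne
      have hsplit : rs.dropLast ++ [dc] = rs := by
        conv_rhs => rw [← List.dropLast_append_getLast hne]
        rw [List.getLast?_eq_some_getLast hne] at hgl
        rw [(Option.some.injEq _ _).mp hgl]
      have hsumd : sumC rs.dropLast + dc.2 = (ds.length : Int) := by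
        rw [← hsum]
        conv_rhs => rw [← hsplit]
        rw [sumC_append]; simp [sumC]
      have hrange : PySem.List.pyRange 1 ((ds ++ [d]).length : Int) 1
          = PySem.List.pyRange 1 (ds.length : Int) 1 ++ [(ds.length : Int)] := by
        have hlen1 : ((ds ++ [d]).length : Int) = (ds.length : Int) + 1 := by simp
        rw [hlen1, PySem.List.pyRange_one_succ_right (by omega)]
      have hfilter :
          (PySem.List.pyRange 1 (ds.length : Int) 1).filter
            (fun i => PySem.List.pyGetD (ds ++ [d]) (i - 1) (0, 0) != PySem.List.pyGetD (ds ++ [d]) i (0, 0))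
          = (PySem.List.pyRange 1 (ds.length : Int) 1).filter
            (fun i => PySem.List.pyGetD ds (i - 1) (0, 0) != PySem.List.pyGetD ds i (0, 0)) := by
        apply List.filter_congr
        intro i hi
        rw [PySem.List.mem_pyRange_one] at hi
        rw [pyGetD_append_lt _ _ _ _ (by omega) (by omega),
            pyGetD_append_lt _ _ _ _ (by omega) (by omega)]
      have hlastget : PySem.List.pyGetD (ds ++ [d]) ((ds.length : Int) - 1) (0, 0) = dc.1 := by
        rw [pyGetD_append_lt _ _ _ _ (by omega) (by omega)]
        exact pyGetD_getLast _ _ _ hdsl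
      have hnewget : PySem.List.pyGetD (ds ++ [d]) (ds.length : Int) (0, 0) = d :=
        pyGetD_concat_len _ _ _
      have hstep : rleStep rs d
          = if dc.1 == d then rs.dropLast ++ [(dc.1, dc.2 + 1)] else rs ++ [(d, 1)] := by
        unfold rleStep
        rw [hgl]
      rw [hstep]
      by_cases heq : dc.1 = d
      · have hbeq : (dc.1 == d) = true := by simp [heq]
        rw [hbeq]
        simp only [if_true]
        refine ⟨?_, ?_, ?_⟩
        · rw [sumC_append]
          simp only [sumC, List.map_cons, List.map_nil, List.sum_cons, List.sum_nil,
            List.length_append, List.length_cons, List.length_nil] at hsumd ⊢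
          push_cast
          omega
        · simp [heq]
        · rw [List.dropLast_concat, hrange, List.filter_append, hfilter, ← hends]
          suffices hz : ([(ds.length : Int)]).filter
              (fun i => PySem.List.pyGetD (ds ++ [d]) (i - 1) (0, 0) != PySem.List.pyGetD (ds ++ [d]) i (0, 0)) = [] by
            rw [hz, List.append_nil]
          simp only [List.filter_cons, List.filter_nil, hlastget, hnewget]
          simp [heq]
      · have hbeq : (dc.1 == d) = false := by simp [heq]
        rw [hbeq]
        simp only [Bool.false_eq_true, if_false]
        refine ⟨?_, ?_, ?_⟩
        · rw [sumC_append]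
          simp only [sumC, List.map_cons, List.map_nil, List.sum_cons, List.sum_nil,
            List.length_append, List.length_cons, List.length_nil] at hsum ⊢
          push_cast
          omega
        · simp
        · rw [List.dropLast_concat]
          conv_lhs => rw [← hsplit]
          rw [cumEnds_append, hends, hrange, List.filter_append, hfilter]
          congr 1
          simp only [cumEnds, List.filter_cons, List.filter_nil, hlastget, hnewget]
          have hb : (dc.1 != d) = true := by simp [heq]
          rw [hb]
          simp only [if_true]
          congr 1
          omega

-- the j-th step vector is the difference of consecutive points
theorem diffs_get (seg : List (Int × Int)) (i : Int) (h0 : 0 ≤ i)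
    (h : i < (seg.length : Int) - 1) :
    PySem.List.pyGetD
        ((seg.zip (seg.drop 1)).map (fun pq => (pq.2.1 - pq.1.1, pq.2.2 - pq.1.2))) i (0, 0)
      = ((PySem.List.pyGetD seg (i + 1) (0, 0)).1 - (PySem.List.pyGetD seg i (0, 0)).1,
         (PySem.List.pyGetD seg (i + 1) (0, 0)).2 - (PySem.List.pyGetD seg i (0, 0)).2) := by
  rw [PySem.List.pyGetD_eq_getElem _ _ h0 (by simp [List.length_zip]; omega)]
  rw [List.getElem_map, List.getElem_zip, List.getElem_drop]
  rw [PySem.List.pyGetD_eq_getElem _ _ (by omega) (by omega),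
      PySem.List.pyGetD_eq_getElem _ _ h0 (by omega)]
  have ht : (i + 1).toNat = i.toNat + 1 := by omega
  simp [ht, Nat.add_comm]

theorem reduceSeg_eq (seg : List (Int × Int)) (h : seg ≠ []) :
    reduceSegA seg = reduceSegB seg := by
  have hn : 1 ≤ seg.length := List.length_pos_of_ne_nil h
  unfold reduceSegA reduceSegB
  simp only []
  rw [PySem.List.foldl_append_if
        (p := fun i =>
          let pm := PySem.List.pyGetD seg (i - 1) (0, 0)
          let p := PySem.List.pyGetD seg i (0, 0)
          let pp := PySem.List.pyGetD seg (i + 1) (0, 0)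
          (p.1 - pm.1 != pp.1 - p.1) || (p.2 - pm.2 != pp.2 - p.2))
        (f := fun i => PySem.List.pyGetD seg i (0, 0))]
  rw [decode_fold]
  simp only []
  have hdlen : (((seg.zip (seg.drop 1)).map
      (fun pq => (pq.2.1 - pq.1.1, pq.2.2 - pq.1.2))).length : Int) = (seg.length : Int) - 1 := by
    simp [List.length_zip]
    omega
  rw [(rle_spec _).2.2, hdlen]
  have hfil : (PySem.List.pyRange 1 ((seg.length : Int) - 1) 1).filter
        (fun i => PySem.List.pyGetD
            ((seg.zip (seg.drop 1)).map (fun pq => (pq.2.1 - pq.1.1, pq.2.2 - pq.1.2))) (i - 1) (0, 0)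
          != PySem.List.pyGetD
            ((seg.zip (seg.drop 1)).map (fun pq => (pq.2.1 - pq.1.1, pq.2.2 - pq.1.2))) i (0, 0))
      = (PySem.List.pyRange 1 ((seg.length : Int) - 1) 1).filter
        (fun i =>
          let pm := PySem.List.pyGetD seg (i - 1) (0, 0)
          let p := PySem.List.pyGetD seg i (0, 0)
          let pp := PySem.List.pyGetD seg (i + 1) (0, 0)
          (p.1 - pm.1 != pp.1 - p.1) || (p.2 - pm.2 != pp.2 - p.2)) := by
    apply List.filter_congr
    intro i hi
    rw [PySem.List.mem_pyRange_one] at hi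
    rw [diffs_get seg (i - 1) (by omega) (by omega), diffs_get seg i (by omega) (by omega)]
    have hi1 : i - 1 + 1 = i := by omega
    rw [hi1, pair_bne]
  rw [hfil, List.append_assoc]

theorem fold_eq (segments : List (List (Int × Int))) (acc : List (List (Int × Int)))
    (h : ∀ s ∈ segments, s ≠ []) :
    segments.foldl
        (fun ns seg => let n := reduceSegA seg; if n.length > 1 then ns ++ [n] else ns) acc
      = segments.foldl
        (fun ns seg => let n := reduceSegB seg; if n.length > 1 then ns ++ [n] else ns) acc := by
  induction segments generalizing acc with
  | nil => rfl
  | cons seg rest ih =>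
    simp only [List.foldl_cons]
    rw [reduceSeg_eq seg (h seg List.mem_cons_self)]
    exact ih _ (fun s hs => h s (List.mem_cons_of_mem _ hs))

-- ===== VERDICT (by name: the statement is the Claim_ definition above) =====
theorem reduce_segments_spec : Claim_equal_reduce_segments := by
  intro segments _hdom hpre
  unfold Spec_reduce_segments reduce_segments reduce_segments_alt
  exact fold_eq segments [] hpre
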